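-- pv_equiv track=rewrite | github.com/jhillierdavis/advent-of-code-solutions | aoc-2021/aoc-2021-day-17/solution-in-python3/solution.py | calculate_sequence
-- ===== SOURCE A (Python) =====
-- def calculate_sequence(speed_x, speed_y, max_steps):
--     seq = []
--     current_pos_x = 0
--     current_pos_y = 0
--     current_speed_x = speed_x
--     current_speed_y = speed_y
--     for i in range(max_steps):
--         current_pos_x += current_speed_x
--         current_pos_y += current_speed_y
--         seq.append((current_pos_x, current_pos_y))
--
--         # Adjust speeds
--         if current_speed_x > 0:
--             current_speed_x -= 1
--         elif current_speed_x < 0: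
--             current_speed_x += 1
--         current_speed_y -= 1
--     return seq
-- ===== SOURCE B (Python) =====
-- def calculate_sequence(speed_x, speed_y, max_steps):
--     # Closed-form: position after i+1 steps, no running state.
--     ax = abs(speed_x)
--     sgn = (speed_x > 0) - (speed_x < 0)
--     def pos(i):
--         k = min(i + 1, ax)
--         x = sgn * (k * ax - k * (k - 1) // 2)
--         y = (i + 1) * speed_y - i * (i + 1) // 2
--         return (x, y)
--     return [pos(i) for i in range(max_steps)]
-- ===== Notes on version B (the rewrite author's own statement) =====
-- stated objective: alternative
-- what changed: B replaces A's step-by-step simulation with running position/velocity state by a single comprehension computing each position in closed form from its index via triangular-number formulas (drag-clamped for x).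
import Mathlib
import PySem

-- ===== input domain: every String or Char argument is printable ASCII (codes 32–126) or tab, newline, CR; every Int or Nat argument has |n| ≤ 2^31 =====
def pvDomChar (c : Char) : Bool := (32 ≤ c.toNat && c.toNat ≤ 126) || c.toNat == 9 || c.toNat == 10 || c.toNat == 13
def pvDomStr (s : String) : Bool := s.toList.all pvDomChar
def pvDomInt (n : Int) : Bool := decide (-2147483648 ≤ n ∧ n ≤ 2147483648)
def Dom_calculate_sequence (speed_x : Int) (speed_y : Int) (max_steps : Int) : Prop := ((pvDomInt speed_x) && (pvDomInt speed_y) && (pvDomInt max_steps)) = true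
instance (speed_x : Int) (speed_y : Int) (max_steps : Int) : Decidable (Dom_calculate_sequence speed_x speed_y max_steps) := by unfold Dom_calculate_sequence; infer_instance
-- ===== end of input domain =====

-- B replaces A's step-by-step position/velocity simulation by a closed-form
-- (triangular-number) computation of each position; objective: alternative.


-- ===== PORT A =====
-- the body of A's for-loop, acting on the state (seq, pos_x, pos_y, speed_x, speed_y)
def calcStepA (st : List (Int × Int) × Int × Int × Int × Int) (_i : Int) :
    List (Int × Int) × Int × Int × Int × Int :=
  match st with
  | (seq, px, py, vx, vy) =>
    let px' := px + vx
    let py' := py + vy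
    let seq' := seq ++ [(px', py')]
    let vx' := if vx > 0 then vx - 1 else if vx < 0 then vx + 1 else vx
    (seq', px', py', vx', vy - 1)

def calculate_sequence (speed_x : Int) (speed_y : Int) (max_steps : Int) : List (Int × Int) :=
  ((PySem.List.pyRange 0 max_steps 1).foldl calcStepA
    (([] : List (Int × Int)), (0 : Int), (0 : Int), speed_x, speed_y)).1

-- ===== PORT B =====
-- B's helper 'pos': closed-form position after i+1 steps
def calcPosB (speed_x : Int) (speed_y : Int) (i : Int) : Int × Int :=
  let ax := |speed_x|
  let sgn : Int := (if speed_x > 0 then 1 else 0) - (if speed_x < 0 then 1 else 0)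
  let k := min (i + 1) ax
  let x := sgn * (k * ax - PySem.Int.floordiv (k * (k - 1)) 2)
  let y := (i + 1) * speed_y - PySem.Int.floordiv (i * (i + 1)) 2
  (x, y)

def calculate_sequence_alt (speed_x : Int) (speed_y : Int) (max_steps : Int) : List (Int × Int) :=
  (PySem.List.pyRange 0 max_steps 1).map (calcPosB speed_x speed_y)

-- ===== PRECONDITION & SPEC =====
def Spec_calculate_sequence (speed_x : Int) (speed_y : Int) (max_steps : Int) (out : List (Int × Int)) : Prop := out = calculate_sequence_alt speed_x speed_y max_steps
instance (speed_x : Int) (speed_y : Int) (max_steps : Int) (out : List (Int × Int)) : Decidable (Spec_calculate_sequence speed_x speed_y max_steps out) := by unfold Spec_calculate_sequence; infer_instance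

-- ===== CLAIM (what is proved, stated in full; the proofs are below) =====
def Claim_equal_calculate_sequence : Prop := ∀ (speed_x : Int) (speed_y : Int) (max_steps : Int), Dom_calculate_sequence speed_x speed_y max_steps → Spec_calculate_sequence speed_x speed_y max_steps (calculate_sequence speed_x speed_y max_steps)

-- ===== LEMMAS AND PROOFS =====

-- closed forms for A's state after j steps
def pvSgn (s : Int) : Int := (if s > 0 then 1 else 0) - (if s < 0 then 1 else 0)
def pvX (sx : Int) (j : Int) : Int :=
  pvSgn sx * (min j |sx| * |sx| - PySem.Int.floordiv (min j |sx| * (min j |sx| - 1)) 2)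
def pvY (sy : Int) (j : Int) : Int := j * sy - PySem.Int.floordiv ((j - 1) * j) 2
def pvVX (sx : Int) (j : Int) : Int := pvSgn sx * (|sx| - min j |sx|)

lemma pvTri_succ (j : Int) :
    PySem.Int.floordiv (j * (j + 1)) 2 = PySem.Int.floordiv (j * (j - 1)) 2 + j := by
  rw [PySem.Int.floordiv_eq_ediv_of_pos (by norm_num),
      PySem.Int.floordiv_eq_ediv_of_pos (by norm_num)]
  have h : j * (j + 1) = j * (j - 1) + 2 * j := by ring
  rw [h]
  omega

lemma pvX_step (sx j : Int) (_hj : 0 ≤ j) : pvX sx j + pvVX sx j = pvX sx (j + 1) := by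
  unfold pvX pvVX
  by_cases h : j < |sx|
  · rw [min_eq_left (by omega), min_eq_left (by omega)]
    have : (j + 1) * ((j + 1) - 1) = j * (j + 1) := by ring
    rw [this, pvTri_succ]
    ring
  · rw [min_eq_right (by omega), min_eq_right (by omega)]
    ring

lemma pvY_step (sy j : Int) : pvY sy j + (sy - j) = pvY sy (j + 1) := by
  unfold pvY
  have h : (j + 1 - 1) * (j + 1) = (j - 1) * j + 2 * j := by ring
  rw [PySem.Int.floordiv_eq_ediv_of_pos (by norm_num),
      PySem.Int.floordiv_eq_ediv_of_pos (by norm_num), h]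
  have h2 : (j + 1) * sy = j * sy + sy := by ring
  rw [h2]
  omega

lemma pvVX_step (sx j : Int) (_hj : 0 ≤ j) :
    (if pvVX sx j > 0 then pvVX sx j - 1 else if pvVX sx j < 0 then pvVX sx j + 1 else pvVX sx j)
      = pvVX sx (j + 1) := by
  unfold pvVX pvSgn
  rcases lt_trichotomy sx 0 with h | h | h
  · rw [abs_of_neg h]
    split_ifs <;> omega
  · subst h; simp
  · rw [abs_of_pos h]
    split_ifs <;> omega

lemma pvPosB_eq (sx sy j : Int) : calcPosB sx sy j = (pvX sx (j + 1), pvY sy (j + 1)) := by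
  unfold calcPosB pvX pvY pvSgn
  have h : j * (j + 1) = (j + 1 - 1) * (j + 1) := by ring
  rw [h]

lemma pvLoop (sx sy : Int) (n : Nat) :
    (PySem.List.pyRange 0 (n : Int) 1).foldl calcStepA
      (([] : List (Int × Int)), (0 : Int), (0 : Int), sx, sy)
    = ((PySem.List.pyRange 0 (n : Int) 1).map (calcPosB sx sy),
        pvX sx n, pvY sy n, pvVX sx n, sy - n) := by
  induction n with
  | zero =>
    rw [PySem.List.pyRange_one_eq_nil (by norm_num)]
    simp only [List.foldl_nil, List.map_nil]
    have hx : pvX sx 0 = 0 := by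
      unfold pvX
      rw [min_eq_left (abs_nonneg sx)]
      simp
    have hy : pvY sy 0 = 0 := by
      unfold pvY
      norm_num [PySem.Int.floordiv_eq_ediv_of_pos]
    have hvx : pvVX sx 0 = sx := by
      unfold pvVX pvSgn
      rw [min_eq_left (abs_nonneg sx)]
      rcases lt_trichotomy sx 0 with h | h | h
      · rw [abs_of_neg h]; split_ifs <;> omega
      · subst h; simp
      · rw [abs_of_pos h]; split_ifs <;> omega
    push_cast
    rw [hx, hy, hvx]
    norm_num
  | succ m ih =>
    have hcast : ((m + 1 : Nat) : Int) = (m : Int) + 1 := by push_cast; ring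
    rw [hcast, PySem.List.pyRange_one_succ_right (Int.natCast_nonneg m),
        List.foldl_append, List.map_append, ih]
    simp only [List.foldl_cons, List.foldl_nil, List.map_cons, List.map_nil]
    show calcStepA _ _ = _
    unfold calcStepA
    simp only
    have hm : (0 : Int) ≤ (m : Int) := Int.natCast_nonneg m
    rw [pvX_step sx m hm, pvY_step sy m, pvVX_step sx m hm, pvPosB_eq]
    simp only [Prod.mk.injEq, true_and]
    ring

-- ===== VERDICT (by name: the statement is the Claim_ definition above) =====
theorem calculate_sequence_spec : Claim_equal_calculate_sequence := by
  intro sx sy ms _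
  unfold Spec_calculate_sequence calculate_sequence calculate_sequence_alt
  by_cases h : ms ≤ 0
  · rw [PySem.List.pyRange_one_eq_nil h]
    rfl
  · have hms : ms = ((ms.toNat : Nat) : Int) := by omega
    rw [hms, pvLoop]
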